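-- pv_equiv track=rewrite | github.com/joshanashakya/dissertation | workspace/dataset/java-python/GeeksForGeeks/1975/A/2.py | totalPairs
-- ===== SOURCE A (Python) =====
-- def totalPairs(arr, n):
--
--     # map to store count of elements
--     # with equal number of set bits
--     m = dict()
--
--     for i in range(n):
--
--         # inbuilt function that returns the
--         # count of set bits of the number
--         x = bin(arr[i]).count('1')
--
--         m[x] = m.get(x, 0) + 1;
--
--     result = 0
--     for it in m:
--
--         # there can be (n*(n-1)/2) unique two-
--         # element pairs to choose from n elements
--         result+= (m[it] * (m[it] - 1)) // 2
--
--     return result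
-- ===== SOURCE B (Python) =====
-- def totalPairs(arr, n):
--     # One pass: each prior element with the same set-bit count forms one new pair.
--     m = {}
--     result = 0
--     for i in range(n):
--         x = bin(arr[i]).count('1')
--         result += m.get(x, 0)
--         m[x] = m.get(x, 0) + 1
--     return result
-- ===== Notes on version B (the rewrite author's own statement) =====
-- stated objective: simpler
-- what changed: Single pass that accumulates the pair total incrementally (result += count of prior elements with the same bit count), eliminating A's second loop over the distinct keys and the C(c,2) closed form.
import Mathlib
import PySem

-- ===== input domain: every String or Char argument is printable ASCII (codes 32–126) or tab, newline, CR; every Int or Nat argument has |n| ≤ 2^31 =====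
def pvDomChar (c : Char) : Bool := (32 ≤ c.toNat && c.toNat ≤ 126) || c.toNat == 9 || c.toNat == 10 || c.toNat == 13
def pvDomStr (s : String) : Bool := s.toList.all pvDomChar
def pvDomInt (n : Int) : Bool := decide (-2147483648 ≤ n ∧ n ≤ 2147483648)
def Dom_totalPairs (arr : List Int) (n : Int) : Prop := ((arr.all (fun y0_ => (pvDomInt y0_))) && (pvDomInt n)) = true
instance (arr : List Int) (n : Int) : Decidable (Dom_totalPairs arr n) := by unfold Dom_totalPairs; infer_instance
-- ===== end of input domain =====

-- B replaces A's second loop over distinct bit-count keys (with the C(c,2) closed form)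
-- by a single pass that adds, for each element, the number of prior elements with the
-- same set-bit count; objective: simpler.


-- ===== PORT A =====
-- A's second loop 'for it in m: result += (m[it]*(m[it]-1))//2' (m.keys is the dict's
-- insertion order; the result, a sum, does not depend on iteration order)
def pvSecondLoop (m : PySem.Dict Nat Int) : Int :=
  m.keys.foldl
    (fun result it => result + PySem.Int.floordiv (m.getD it 0 * (m.getD it 0 - 1)) 2) 0

-- bin(arr[i]).count('1') is the set-bit count of |arr[i]| = PySem.Int.bitCount.
def totalPairs (arr : List Int) (n : Int) : Int :=
  pvSecondLoop
    ((PySem.List.pyRange 0 n 1).foldl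
      (fun d i =>
        d.insert (PySem.Int.bitCount (PySem.List.pyGetD arr i 0))
          (d.getD (PySem.Int.bitCount (PySem.List.pyGetD arr i 0)) 0 + 1))
      PySem.Dict.empty)

-- ===== PORT B =====
def totalPairs_alt (arr : List Int) (n : Int) : Int :=
  ((PySem.List.pyRange 0 n 1).foldl
      (fun (st : PySem.Dict Nat Int × Int) i =>
        (st.1.insert (PySem.Int.bitCount (PySem.List.pyGetD arr i 0))
          (st.1.getD (PySem.Int.bitCount (PySem.List.pyGetD arr i 0)) 0 + 1),
         st.2 + st.1.getD (PySem.Int.bitCount (PySem.List.pyGetD arr i 0)) 0))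
      (PySem.Dict.empty, 0)).2

-- ===== PRECONDITION & SPEC =====
-- Python A raises IndexError at arr[i] as soon as i reaches len(arr) when n > len(arr).
def Pre_totalPairs (arr : List Int) (n : Int) : Prop := n ≤ (arr.length : Int)
instance (arr : List Int) (n : Int) : Decidable (Pre_totalPairs arr n) := by
  unfold Pre_totalPairs; infer_instance
def pvWitness_totalPairs : List Int × Int := ([3, 5, 1, -6], 4)
def Spec_totalPairs (arr : List Int) (n : Int) (out : Int) : Prop := out = totalPairs_alt arr n
instance (arr : List Int) (n : Int) (out : Int) : Decidable (Spec_totalPairs arr n out) := by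
  unfold Spec_totalPairs; infer_instance

-- ===== CLAIM (what is proved, stated in full; the proofs are below) =====
def Claim_equal_totalPairs : Prop := ∀ (arr : List Int) (n : Int), Dom_totalPairs arr n → Pre_totalPairs arr n → Spec_totalPairs arr n (totalPairs arr n)

-- ===== LEMMAS AND PROOFS =====

-- C(c, 2) as A computes it
def pvC2 (c : Nat) : Int := PySem.Int.floordiv ((c : Int) * ((c : Int) - 1)) 2

lemma pvC2_succ (c : Nat) : pvC2 (c + 1) = pvC2 c + (c : Int) := by
  unfold pvC2
  rw [PySem.Int.floordiv_eq_ediv_of_pos (by norm_num),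
      PySem.Int.floordiv_eq_ediv_of_pos (by norm_num)]
  have h : ((c + 1 : Nat) : Int) * (((c + 1 : Nat) : Int) - 1)
      = (c : Int) * ((c : Int) - 1) + (c : Int) * 2 := by push_cast; ring
  rw [h, Int.add_mul_ediv_right _ _ (by norm_num)]

-- the pair-fold's dict component is the plain counting fold
lemma pvFst (xs : List Nat) (d : PySem.Dict Nat Int) (r : Int) :
    (xs.foldl
      (fun (st : PySem.Dict Nat Int × Int) x =>
        (st.1.insert x (st.1.getD x 0 + 1), st.2 + st.1.getD x 0)) (d, r)).1
    = xs.foldl (fun d x => d.insert x (d.getD x 0 + 1)) d := by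
  induction xs generalizing d r with
  | nil => rfl
  | cons a xs ih => simpa [List.foldl] using ih _ _

-- a sum over a Nodup list whose summand changes only at one member x
lemma pvSum_update (S : List Nat) (f g : Nat → Int) (x : Nat)
    (hnd : S.Nodup) (hx : x ∈ S) (hagree : ∀ k ∈ S, k ≠ x → g k = f k) :
    (S.map g).sum = (S.map f).sum + (g x - f x) := by
  induction S with
  | nil => cases hx
  | cons a S ih =>
    rcases List.nodup_cons.mp hnd with ⟨ha, hndS⟩
    rcases List.mem_cons.mp hx with h | h
    · subst h
      have : S.map g = S.map f := List.map_congr_left (fun k hk =>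
        hagree k (List.mem_cons_of_mem _ hk) (fun e => ha (e ▸ hk)))
      simp [this]; ring
    · have hax : a ≠ x := fun e => ha (e ▸ h)
      have := ih hndS h (fun k hk hne => hagree k (List.mem_cons_of_mem _ hk) hne)
      simp [this, hagree a (List.mem_cons_self) hax]; ring

-- the core: the one-pass running total equals the sum of C(count, 2) over the distinct values
lemma pvLoop_eq (xs : List Nat) :
    (xs.foldl
      (fun (st : PySem.Dict Nat Int × Int) x =>
        (st.1.insert x (st.1.getD x 0 + 1), st.2 + st.1.getD x 0))
      (PySem.Dict.empty, 0)).2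
    = ((PySem.Set.ofList xs).map (fun k => pvC2 (xs.count k))).sum := by
  induction xs using List.reverseRecOn with
  | nil => rfl
  | append_singleton xs x ih =>
    rw [List.foldl_append]
    have hfst := pvFst xs (PySem.Dict.empty) 0
    rw [PySem.Dict.foldl_insert_getD_add_one_eq_counter] at hfst
    simp only [List.foldl, hfst, PySem.Dict.getD_counter, ih,
      PySem.Set.ofList_append_singleton]
    by_cases hx : x ∈ xs
    · rw [PySem.Set.add_of_mem ((PySem.Set.mem_ofList xs x).mpr hx)]
      rw [pvSum_update (PySem.Set.ofList xs)
            (fun k => pvC2 (xs.count k)) (fun k => pvC2 ((xs ++ [x]).count k)) x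
            (PySem.Set.nodup_ofList xs) ((PySem.Set.mem_ofList xs x).mpr hx)
            (fun k _ hne => by
              have hxk : x ≠ k := Ne.symm hne
              simp [List.count_append, hxk])]
      have hcx : (xs ++ [x]).count x = xs.count x + 1 := by
        simp [List.count_append]
      rw [hcx, pvC2_succ]; ring
    · rw [PySem.Set.add_of_not_mem (fun hm => hx ((PySem.Set.mem_ofList xs x).mp hm))]
      have hc0 : xs.count x = 0 := List.count_eq_zero.mpr hx
      have hmap : (PySem.Set.ofList xs).map (fun k => pvC2 ((xs ++ [x]).count k))
          = (PySem.Set.ofList xs).map (fun k => pvC2 (xs.count k)) :=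
        List.map_congr_left (fun k hk => by
          have hxk : x ≠ k := fun e => hx (e ▸ ((PySem.Set.mem_ofList xs k).mp hk))
          simp [List.count_append, hxk])
      rw [List.map_append, List.sum_append, hmap]
      simp [hc0, pvC2]

-- ===== VERDICT (by name: the statement is the Claim_ definition above) =====
theorem totalPairs_spec : Claim_equal_totalPairs := by
  intro arr n _ _
  unfold Spec_totalPairs totalPairs totalPairs_alt pvSecondLoop
  rw [← List.foldl_map (f := fun i => PySem.Int.bitCount (PySem.List.pyGetD arr i 0))
        (g := fun (d : PySem.Dict Nat Int) x => d.insert x (d.getD x 0 + 1)),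
      ← List.foldl_map (f := fun i => PySem.Int.bitCount (PySem.List.pyGetD arr i 0))
        (g := fun (st : PySem.Dict Nat Int × Int) x =>
          (st.1.insert x (st.1.getD x 0 + 1), st.2 + st.1.getD x 0))]
  set xs := (PySem.List.pyRange 0 n 1).map
    (fun i => PySem.Int.bitCount (PySem.List.pyGetD arr i 0)) with hxs
  rw [pvLoop_eq xs, PySem.Dict.foldl_insert_getD_add_one_eq_counter,
      PySem.Dict.keys_counter, PySem.List.foldl_add]
  simp [PySem.Dict.getD_counter, pvC2]
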